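-- pv_equiv track=rewrite | github.com/AG7GN/kenwood | common710.py | same_frequency_band
-- ===== SOURCE A (Python) =====
-- def same_frequency_band(freq1: int, freq2: int) -> bool:
--     """
--     Check if 2 frequencies in Hz are in the same amateur radio band.
--     :param: freq1:  1st Frequency in Hz
--     :param: freq2:  2nd Frequency in Hz
--     :return: True if both freq1 and freq2 are in the same band,
--     False otherwise
--     """
--     same_band = False
--     for freq_range in FREQUENCY_BAND_LIMITS.values():
--         if freq1 in range(freq_range['min'], freq_range['max']) \
--                 and freq2 in range(freq_range['min'],
--                                    freq_range['max']):
--             same_band = True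
--             break
--     return same_band
--
-- FREQUENCY_BAND_LIMITS = {'118': {'min': 118000000, 'max': 136000000},
--                          '144': {'min': 136000000, 'max': 200000000},
--                          '220': {'min': 200000000, 'max': 300000000},
--                          '440': {'min': 400000000, 'max': 524000000},
--                          '1200': {'min': 800000000, 'max': 1300000000}}
-- ===== SOURCE B (Python) =====
-- FREQUENCY_BAND_LIMITS = {'118': {'min': 118000000, 'max': 136000000},
--                          '144': {'min': 136000000, 'max': 200000000},
--                          '220': {'min': 200000000, 'max': 300000000},
--                          '440': {'min': 400000000, 'max': 524000000},
--                          '1200': {'min': 800000000, 'max': 1300000000}}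
--
--
-- def band_of(freq):
--     """Return the key of the band containing freq, or None."""
--     for key, r in FREQUENCY_BAND_LIMITS.items():
--         if freq in range(r['min'], r['max']):
--             return key
--     return None
--
--
-- def same_frequency_band(freq1: int, freq2: int) -> bool:
--     b1 = band_of(freq1)
--     return b1 is not None and b1 == band_of(freq2)
-- ===== Notes on version B (the rewrite author's own statement) =====
-- stated objective: simpler
-- what changed: A scans the band table once testing both frequencies jointly inside the loop; B factors out a band_of(f) helper that classifies each frequency independently into a band key (or None) and then just compares the two keys, requiring the first to be non-None.
import Mathlib
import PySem

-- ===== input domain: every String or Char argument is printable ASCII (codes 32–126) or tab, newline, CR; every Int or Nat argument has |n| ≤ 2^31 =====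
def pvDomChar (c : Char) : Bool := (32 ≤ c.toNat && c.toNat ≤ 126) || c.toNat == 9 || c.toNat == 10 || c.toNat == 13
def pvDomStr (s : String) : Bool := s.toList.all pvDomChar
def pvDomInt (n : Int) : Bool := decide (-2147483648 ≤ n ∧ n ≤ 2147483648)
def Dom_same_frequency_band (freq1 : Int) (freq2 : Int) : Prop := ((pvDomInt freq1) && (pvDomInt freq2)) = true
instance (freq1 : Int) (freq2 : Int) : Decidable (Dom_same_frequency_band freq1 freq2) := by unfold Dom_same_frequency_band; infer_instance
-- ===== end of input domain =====

-- B factors the band scan into a band_of helper classifying each frequency independently,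
-- then compares the two band keys (first must be non-None); same result, plainer decomposition.


-- module constant FREQUENCY_BAND_LIMITS: dict of key → {'min': …, 'max': …}, as an assoc list key → (min, max)
def FREQUENCY_BAND_LIMITS : List (String × Int × Int) :=
  [("118", 118000000, 136000000),
   ("144", 136000000, 200000000),
   ("220", 200000000, 300000000),
   ("440", 400000000, 524000000),
   ("1200", 800000000, 1300000000)]

-- ===== PORT A =====
-- the for-loop with break: walk .values(), set same_band = True and stop at the first
-- range containing both frequencies (f in range(lo, hi) for an int f is lo ≤ f < hi)
def pvLoopA (freq1 freq2 : Int) : List (Int × Int) → Bool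
  | [] => false
  | (lo, hi) :: rest =>
      if lo ≤ freq1 ∧ freq1 < hi ∧ lo ≤ freq2 ∧ freq2 < hi then true
      else pvLoopA freq1 freq2 rest

def same_frequency_band (freq1 : Int) (freq2 : Int) : Bool :=
  pvLoopA freq1 freq2 (FREQUENCY_BAND_LIMITS.map Prod.snd)

-- ===== PORT B =====
-- band_of: key of the first band whose range contains freq, else None
def band_of (freq : Int) : Option String :=
  go FREQUENCY_BAND_LIMITS
where
  go : List (String × Int × Int) → Option String
    | [] => none
    | (key, lo, hi) :: rest =>
        if lo ≤ freq ∧ freq < hi then some key else go rest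

def same_frequency_band_alt (freq1 : Int) (freq2 : Int) : Bool :=
  let b1 := band_of freq1
  b1.isSome && b1 == band_of freq2

-- ===== PRECONDITION & SPEC =====
def Spec_same_frequency_band (freq1 : Int) (freq2 : Int) (out : Bool) : Prop := out = same_frequency_band_alt freq1 freq2
instance (freq1 : Int) (freq2 : Int) (out : Bool) : Decidable (Spec_same_frequency_band freq1 freq2 out) := by unfold Spec_same_frequency_band; infer_instance

-- ===== CLAIM (what is proved, stated in full; the proofs are below) =====
def Claim_equal_same_frequency_band : Prop := ∀ (freq1 : Int) (freq2 : Int), Dom_same_frequency_band freq1 freq2 → Spec_same_frequency_band freq1 freq2 (same_frequency_band freq1 freq2)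

-- ===== LEMMAS AND PROOFS =====
-- bands pairwise: distinct keys and disjoint ranges
def pvDisj (a b : String × Int × Int) : Prop :=
  a.1 ≠ b.1 ∧ (a.2.2 ≤ b.2.1 ∨ b.2.2 ≤ a.2.1)

theorem pvLoopA_false (f1 f2 : Int) (l : List (Int × Int))
    (h : ∀ p ∈ l, ¬(p.1 ≤ f1 ∧ f1 < p.2) ∨ ¬(p.1 ≤ f2 ∧ f2 < p.2)) :
    pvLoopA f1 f2 l = false := by
  induction l with
  | nil => rfl
  | cons p rest ih =>
      obtain ⟨lo, hi⟩ := p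
      have hp := h (lo, hi) (by simp)
      simp only [pvLoopA]
      rw [if_neg (by rcases hp with hp | hp <;> simp_all)]
      exact ih (fun q hq => h q (List.mem_cons_of_mem _ hq))

theorem pvGo_key (f : Int) (l : List (String × Int × Int)) (k : String)
    (h : band_of.go f l = some k) : ∃ q ∈ l, q.1 = k := by
  induction l with
  | nil => simp [band_of.go] at h
  | cons p rest ih =>
      simp only [band_of.go] at h
      split_ifs at h with hc
      · exact ⟨p, by simp, by simpa using h⟩
      · obtain ⟨q, hq, hk⟩ := ih h
        exact ⟨q, List.mem_cons_of_mem _ hq, hk⟩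

theorem pv_main (f1 f2 : Int) (l : List (String × Int × Int))
    (hp : l.Pairwise pvDisj) :
    pvLoopA f1 f2 (l.map Prod.snd) =
      ((band_of.go f1 l).isSome && band_of.go f1 l == band_of.go f2 l) := by
  induction l with
  | nil => rfl
  | cons p rest ih =>
      obtain ⟨key, lo, hi⟩ := p
      rw [List.pairwise_cons] at hp
      obtain ⟨hhead, hrest⟩ := hp
      by_cases c1 : lo ≤ f1 ∧ f1 < hi <;> by_cases c2 : lo ≤ f2 ∧ f2 < hi
      · -- both in head band
        simp [pvLoopA, band_of.go, c1, c2]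
      · -- f1 in head, f2 not: loop finds no later band for f1; keys distinct
        have hloop : pvLoopA f1 f2 (rest.map Prod.snd) = false := by
          apply pvLoopA_false
          intro q hq
          obtain ⟨⟨qk, qlo, qhi⟩, hq', rfl⟩ := List.mem_map.mp hq
          have hd := (hhead _ hq').2
          dsimp only [pvDisj] at hd
          left; dsimp only; omega
        simp only [pvLoopA, List.map, band_of.go]
        rw [if_neg (by omega), if_pos c1, if_neg c2, hloop]
        cases hgo : band_of.go f2 rest with
        | none => simp
        | some k =>
            obtain ⟨q, hq, hk⟩ := pvGo_key f2 rest k hgo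
            have : key ≠ k := hk ▸ (hhead q hq).1
            simp [this]
      · -- f2 in head, f1 not
        have hloop : pvLoopA f1 f2 (rest.map Prod.snd) = false := by
          apply pvLoopA_false
          intro q hq
          obtain ⟨⟨qk, qlo, qhi⟩, hq', rfl⟩ := List.mem_map.mp hq
          have hd := (hhead _ hq').2
          dsimp only [pvDisj] at hd
          right; dsimp only; omega
        simp only [pvLoopA, List.map, band_of.go]
        rw [if_neg (by omega), if_neg c1, if_pos c2, hloop]
        cases hgo : band_of.go f1 rest with
        | none => simp
        | some k =>
            obtain ⟨q, hq, hk⟩ := pvGo_key f1 rest k hgo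
            have : k ≠ key := hk ▸ (hhead q hq).1.symm
            simp [this]
      · -- neither in head: recurse
        simp only [pvLoopA, List.map, band_of.go]
        rw [if_neg (by omega), if_neg c1, if_neg c2]
        exact ih hrest

theorem pv_eq (freq1 freq2 : Int) :
    same_frequency_band freq1 freq2 = same_frequency_band_alt freq1 freq2 := by
  unfold same_frequency_band same_frequency_band_alt band_of
  exact pv_main freq1 freq2 FREQUENCY_BAND_LIMITS (by
    unfold FREQUENCY_BAND_LIMITS pvDisj
    decide)

-- ===== VERDICT (by name: the statement is the Claim_ definition above) =====
theorem same_frequency_band_spec : Claim_equal_same_frequency_band := by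
  intro f1 f2 _
  unfold Spec_same_frequency_band
  exact pv_eq f1 f2
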